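-- pv_equiv track=rewrite | github.com/UWCS/progcomps | 2223_t2/2/sols/sol1.py | parse_uwpl
-- ===== SOURCE A (Python) =====
-- import math
--
-- def parse_uwpl(script: list[str]) -> dict[str, int]:
--     vars = {}
--     stack = [1]
--     curr = 0
--     while curr < len(script):
--         if script[curr] == "}":
--             stack.pop()
--         elif script[curr].startswith("repeat "):
--             rep = int(script[curr][7:])
--             stack.append(rep)
--             curr += 1  # skip past opening {
--         else: # must be increment
--             var_name = script[curr][:-2]
--             if var_name not in vars:
--                 vars[var_name] = 0
--             vars[var_name] += math.prod(stack)
--         curr += 1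
--     return vars
-- ===== SOURCE B (Python) =====
-- def parse_uwpl(script: list[str]) -> dict[str, int]:
--     # Recursive descent over one shared iterator: each nested block carries the
--     # product of its enclosing repeat counts as a parameter, so an increment is
--     # O(1) and no stack of repeat counts is kept at all.
--     totals = {}
--     it = iter(script)
--
--     def block(mult):
--         for line in it:
--             if line == "}":
--                 return
--             if line.startswith("repeat "):
--                 rep = int(line[7:])
--                 next(it, None)  # skip the opening "{"
--                 block(mult * rep)
--             else:
--                 name = line[:-2]
--                 totals[name] = totals.get(name, 0) + mult
--
--     block(1)
--     return totals
-- ===== Notes on version B (the rewrite author's own statement) =====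
-- stated objective: faster
-- what changed: Replaces A's flat loop over an explicit stack of repeat counts (with a math.prod over the whole stack at every increment) by a recursive-descent parse over one shared iterator in which each block receives the product of its enclosing repeats as a parameter, so increments are O(1) and no stack is kept.
-- outside the precondition, e.g. on parse_uwpl(['}', 'x ++']): A returns {'x ': 1}, B returns {}
import Mathlib
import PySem

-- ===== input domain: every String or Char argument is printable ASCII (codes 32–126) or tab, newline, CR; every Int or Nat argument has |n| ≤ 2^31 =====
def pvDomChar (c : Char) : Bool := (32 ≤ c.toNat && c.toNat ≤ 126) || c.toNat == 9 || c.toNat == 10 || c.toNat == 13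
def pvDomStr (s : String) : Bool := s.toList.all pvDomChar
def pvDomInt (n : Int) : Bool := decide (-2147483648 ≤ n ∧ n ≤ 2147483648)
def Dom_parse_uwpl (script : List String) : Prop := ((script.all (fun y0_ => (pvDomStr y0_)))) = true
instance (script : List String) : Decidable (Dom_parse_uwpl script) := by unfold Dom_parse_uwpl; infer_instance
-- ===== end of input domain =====

-- B replaces A's flat loop over a stack of repeat counts (math.prod over the whole stack at
-- every increment) by a recursive-descent parse carrying the enclosing multiplier down.

-- ===== PORT A =====
-- Python lists used as stacks are represented top-at-head (append = cons, pop = tail).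
-- stack.pop() on the empty stack raises IndexError in Python; excluded by Pre_.
-- int(...) raising ValueError is excluded by Pre_ (ofStr? = some there).
def parse_uwpl_go (rest : List String) (vars : PySem.Dict String Int) (stack : List Int) :
    PySem.Dict String Int :=
  match rest with
  | [] => vars
  | s :: rest =>
    if s = "}" then
      parse_uwpl_go rest vars stack.tail
    else if PySem.Str.startswith s "repeat " then
      let rep := (PySem.Int.ofStr? (PySem.Str.slice s (some 7) none)).getD 0
      -- curr += 1 skips past the opening "{" (structural form of 'recurse on rest.tail')
      match rest with
      | [] => vars
      | _ :: rest' => parse_uwpl_go rest' vars (rep :: stack)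
    else
      let name := PySem.Str.slice s none (some (-2))
      let vars' := if (vars.get? name).isNone then vars.insert name 0 else vars
      parse_uwpl_go rest (vars'.modify name 0 (· + stack.foldl (· * ·) 1)) stack

def parse_uwpl (script : List String) : List (String × Int) :=
  (parse_uwpl_go script PySem.Dict.empty [1]).items

-- ===== PORT B =====
-- Source B's block(mult) reads lines from one shared iterator; the Lean form passes the not-yet
-- consumed suffix in and returns the suffix left when the block's "}" (or the end) is reached.
-- fuel = number of lines still available bounds the recursion; it is never exhausted when
-- called with fuel ≥ rest.length (the fuel-0 branch is unreachable there).
def parse_uwpl_alt_block :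
    Nat → List String → Int → PySem.Dict String Int → PySem.Dict String Int × List String
  | _, [], _, totals => (totals, [])
  | 0, rest, _, totals => (totals, rest)
  | fuel+1, line :: rest, mult, totals =>
    if line = "}" then (totals, rest)
    else if PySem.Str.startswith line "repeat " then
      let rep := (PySem.Int.ofStr? (PySem.Str.slice line (some 7) none)).getD 0
      -- next(it, None) skips the opening "{": the inner block starts on rest.tail
      let r := parse_uwpl_alt_block fuel rest.tail (mult * rep) totals
      parse_uwpl_alt_block fuel r.2 mult r.1
    else
      let name := PySem.Str.slice line none (some (-2))
      parse_uwpl_alt_block fuel rest mult (totals.insert name (totals.getD name 0 + mult))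

def parse_uwpl_alt (script : List String) : List (String × Int) :=
  (parse_uwpl_alt_block script.length script 1 PySem.Dict.empty).1.items

-- ===== PRECONDITION & SPEC =====
-- Pre_ excludes scripts whose "repeat " line carries a non-integer (A raises ValueError) and
-- scripts that pop the brace stack below its initial element (a second unmatched "}" raises
-- IndexError in A, and on lines processed after the stack is emptied A's empty product 1 is an
-- accident of the malformed script while B's top-level block has already returned): the
-- nesting depth, starting at 1, must be ≥ 1 whenever a line is processed.
mutual
def preCheck : List String → Nat → Bool
  | [], _ => true
  | s :: rest, d =>
    if s = "}" then decide (1 ≤ d) && preCheck rest (d - 1)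
    else if PySem.Str.startswith s "repeat " then
      (PySem.Int.ofStr? (PySem.Str.slice s (some 7) none)).isSome && decide (1 ≤ d)
        && preCheckSkip rest d
    else decide (1 ≤ d) && preCheck rest d
-- the line after "repeat n" (the opening "{") is skipped; the block body starts one deeper
def preCheckSkip : List String → Nat → Bool
  | [], _ => true
  | _ :: rest, d => preCheck rest (d + 1)
end

def Pre_parse_uwpl (script : List String) : Prop := preCheck script 1 = true
instance (script : List String) : Decidable (Pre_parse_uwpl script) := by
  unfold Pre_parse_uwpl; infer_instance

def pvWitness_parse_uwpl : List String := ["repeat 3", "{", "x ++", "repeat 2", "{", "y ++", "}", "}"]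

def Spec_parse_uwpl (script : List String) (out : List (String × Int)) : Prop := out = parse_uwpl_alt script
instance (script : List String) (out : List (String × Int)) : Decidable (Spec_parse_uwpl script out) := by unfold Spec_parse_uwpl; infer_instance

-- ===== CLAIM (what is proved, stated in full; the proofs are below) =====
def Claim_equal_parse_uwpl : Prop := ∀ (script : List String), Dom_parse_uwpl script → Pre_parse_uwpl script → Spec_parse_uwpl script (parse_uwpl script)

-- ===== LEMMAS AND PROOFS =====

theorem foldl_mul_shift (s : List Int) (x : Int) :
    s.foldl (· * ·) x = x * s.foldl (· * ·) 1 := by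
  induction s generalizing x with
  | nil => simp
  | cons a s ih =>
    simp only [List.foldl_cons]
    rw [ih (x * a), ih (1 * a)]
    ring

theorem dict_incr_eq (d : PySem.Dict String Int) (k : String) (p : Int) :
    ((if (d.get? k).isNone then d.insert k 0 else d).modify k 0 (· + p))
      = d.insert k (d.getD k 0 + p) := by
  by_cases h : (d.get? k).isNone
  · simp only [if_pos h, PySem.Dict.modify, PySem.Dict.getD_insert_self,
      PySem.Dict.insert_insert_self]
    congr 1
    simp [PySem.Dict.getD, Option.isNone_iff_eq_none.mp h]
  · simp [h, PySem.Dict.modify]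

-- The suffix a block leaves behind is a (length-wise) part of what it was given.
theorem block_nil (fuel : Nat) (mult : Int) (t : PySem.Dict String Int) :
    parse_uwpl_alt_block fuel [] mult t = (t, []) := by
  cases fuel <;> rfl

theorem block_len (fuel : Nat) (rest : List String) (mult : Int) (t : PySem.Dict String Int) :
    (parse_uwpl_alt_block fuel rest mult t).2.length ≤ rest.length := by
  induction fuel generalizing rest mult t with
  | zero => cases rest <;> simp [parse_uwpl_alt_block]
  | succ fuel ih =>
    cases rest with
    | nil => simp [parse_uwpl_alt_block]
    | cons line rest =>
      rw [parse_uwpl_alt_block]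
      split_ifs with h1 h2
      · simp
      · have h5 : rest.tail.length ≤ rest.length := by cases rest <;> simp
        simp only []
        calc (parse_uwpl_alt_block fuel
                (parse_uwpl_alt_block fuel rest.tail
                  (mult * (PySem.Int.ofStr? (PySem.Str.slice line (some 7) none)).getD 0) t).2
                mult
                (parse_uwpl_alt_block fuel rest.tail
                  (mult * (PySem.Int.ofStr? (PySem.Str.slice line (some 7) none)).getD 0) t).1).2.length
            ≤ (parse_uwpl_alt_block fuel rest.tail
                (mult * (PySem.Int.ofStr? (PySem.Str.slice line (some 7) none)).getD 0) t).2.length := ih _ _ _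
          _ ≤ rest.tail.length := ih _ _ _
          _ ≤ rest.length := h5
          _ ≤ (line :: rest).length := by simp
      · calc (parse_uwpl_alt_block fuel rest mult
              (t.insert (PySem.Str.slice line none (some (-2)))
                (t.getD (PySem.Str.slice line none (some (-2))) 0 + mult))).2.length
            ≤ rest.length := ih _ _ _
          _ ≤ (line :: rest).length := by simp

-- Main simulation: A's loop with nonempty stack a :: s equals B's block run at the stack's
-- product, followed by A's loop on the leftover suffix with the popped stack s.
theorem go_block (fuel : Nat) (rest : List String) (vars : PySem.Dict String Int)
    (a : Int) (s : List Int) (h : rest.length ≤ fuel) :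
    parse_uwpl_go rest vars (a :: s) =
      parse_uwpl_go
        (parse_uwpl_alt_block fuel rest ((a :: s).foldl (· * ·) 1) vars).2
        (parse_uwpl_alt_block fuel rest ((a :: s).foldl (· * ·) 1) vars).1 s := by
  induction fuel generalizing rest vars a s with
  | zero =>
    have : rest = [] := by cases rest <;> simp_all
    subst this
    rw [parse_uwpl_go, parse_uwpl_alt_block, parse_uwpl_go]
  | succ fuel ih =>
    cases rest with
    | nil => rw [parse_uwpl_go, parse_uwpl_alt_block, parse_uwpl_go]
    | cons line rest =>
      rw [parse_uwpl_go, parse_uwpl_alt_block]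
      by_cases h1 : line = "}"
      · simp only [if_pos h1, List.tail_cons]
      · simp only [if_neg h1]
        by_cases h2 : PySem.Str.startswith line "repeat " = true
        · simp only [if_pos h2]
          cases rest with
          | nil =>
            simp only [List.tail_nil, block_nil]
            rw [parse_uwpl_go]
          | cons x rest' =>
            have hlen' : rest'.length ≤ fuel := by
              simp only [List.length_cons] at h; omega
            set rep := (PySem.Int.ofStr? (PySem.Str.slice line (some 7) none)).getD 0 with hrep
            have hprod : (rep :: a :: s).foldl (· * ·) 1
                = (a :: s).foldl (· * ·) 1 * rep := by
              simp only [List.foldl_cons]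
              rw [foldl_mul_shift s (1 * rep * a), foldl_mul_shift s (1 * a)]
              ring
            have step1 := ih rest' vars rep (a :: s) hlen'
            rw [hprod] at step1
            simp only [List.tail_cons]
            rw [step1]
            exact ih _ _ a s (le_trans (block_len _ _ _ _) hlen')
        · simp only [if_neg h2]
          rw [dict_incr_eq]
          exact ih rest _ a s (by simp only [List.length_cons] at h; omega)

-- Under preCheck at depth d, a block run on the suffix leaves a suffix good at depth d - 1.
theorem block_pre (fuel : Nat) (rest : List String) (mult : Int) (t : PySem.Dict String Int)
    (d : Nat) (h : rest.length ≤ fuel) (hp : preCheck rest d = true) :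
    preCheck (parse_uwpl_alt_block fuel rest mult t).2 (d - 1) = true := by
  induction fuel generalizing rest mult t d with
  | zero =>
    have : rest = [] := by cases rest <;> simp_all
    subst this; rw [block_nil]; rfl
  | succ fuel ih =>
    cases rest with
    | nil => rw [block_nil]; rfl
    | cons line rest =>
      rw [parse_uwpl_alt_block]
      rw [preCheck] at hp
      by_cases h1 : line = "}"
      · simp only [if_pos h1]
        simp only [if_pos h1, Bool.and_eq_true] at hp
        exact hp.2
      · simp only [if_neg h1]
        simp only [if_neg h1] at hp
        by_cases h2 : PySem.Str.startswith line "repeat " = true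
        · simp only [if_pos h2]
          simp only [if_pos h2, Bool.and_eq_true] at hp
          cases rest with
          | nil =>
            simp only [List.tail_nil, block_nil]
            rfl
          | cons x rest' =>
            have hlen' : rest'.length ≤ fuel := by
              simp only [List.length_cons] at h; omega
            simp only [List.tail_cons]
            rw [preCheckSkip] at hp
            have hinner := ih rest'
              (mult * (PySem.Int.ofStr? (PySem.Str.slice line (some 7) none)).getD 0)
              t (d + 1) hlen' hp.2
            simp only [Nat.add_sub_cancel] at hinner
            exact ih _ mult _ d (le_trans (block_len _ _ _ _) hlen') hinner
        · simp only [if_neg h2]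
          simp only [if_neg h2, Bool.and_eq_true] at hp
          exact ih rest mult _ d (by simp only [List.length_cons] at h; omega) hp.2

theorem preCheck_zero_nil (rest : List String) (h : preCheck rest 0 = true) : rest = [] := by
  cases rest with
  | nil => rfl
  | cons s r =>
    rw [preCheck] at h
    split_ifs at h <;> simp_all

-- ===== VERDICT (by name: the statement is the Claim_ definition above) =====
theorem parse_uwpl_spec : Claim_equal_parse_uwpl := by
  intro script _ hpre
  unfold Spec_parse_uwpl parse_uwpl parse_uwpl_alt
  rw [go_block script.length script PySem.Dict.empty 1 [] le_rfl]
  have hp : preCheck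
      (parse_uwpl_alt_block script.length script (([1] : List Int).foldl (· * ·) 1)
        PySem.Dict.empty).2 0 = true := by
    have := block_pre script.length script (([1] : List Int).foldl (· * ·) 1)
      PySem.Dict.empty 1 le_rfl hpre
    simpa using this
  rw [preCheck_zero_nil _ hp, parse_uwpl_go]
  norm_num
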